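-- pv_equiv track=rewrite | github.com/seanchen513/dcp | dcp283 - given int N, return first N regular nums (evenly divide some power of 60).py | is_regular
-- ===== SOURCE A (Python) =====
-- def is_regular(n):
--     while n % 2 == 0:
--         n //= 2
--
--     while n % 3 == 0:
--         n //= 3
--
--     while n % 5 == 0:
--         n //= 5
--
--     return n == 1
-- ===== SOURCE B (Python) =====
-- def is_regular(n):
--     # gcd-reduction: one division per round removes one copy of each of 2,3,5
--     while True:
--         a, b = abs(n), 30
--         while b:
--             a, b = b, a % b
--         if a == 1:
--             break
--         n //= a
--     return n == 1
-- ===== Notes on version B (the rewrite author's own statement) =====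
-- stated objective: alternative
-- what changed: Replaced A's three per-prime stripping loops (divide out all 2s, then all 3s, then all 5s) by a single gcd-reduction loop: repeatedly compute g = gcd(|n|, 30) with an inline Euclid loop and divide n by g until g becomes 1, then test whether n was reduced to 1.
import Mathlib
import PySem

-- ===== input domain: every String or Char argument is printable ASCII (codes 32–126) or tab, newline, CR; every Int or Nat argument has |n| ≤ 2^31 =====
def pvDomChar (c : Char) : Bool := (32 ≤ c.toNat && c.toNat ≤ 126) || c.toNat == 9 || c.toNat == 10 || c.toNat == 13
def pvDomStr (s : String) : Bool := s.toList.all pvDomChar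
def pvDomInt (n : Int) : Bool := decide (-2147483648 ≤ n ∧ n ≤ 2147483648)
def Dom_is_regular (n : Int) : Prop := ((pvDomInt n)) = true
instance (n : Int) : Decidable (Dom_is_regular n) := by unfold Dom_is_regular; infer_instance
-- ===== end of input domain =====

-- B replaces the three per-prime stripping loops by a single gcd(n,30)-reduction loop (objective: alternative/idiomatic).
-- Both Pythons diverge on n = 0; Pre_ excludes exactly that input.

-- exact division by p (2 ≤ p, p ∣ n) shrinks |n|; used by both ports' termination proofs
theorem pvDivAbsLt (n p : Int) (hn : n ≠ 0) (hp : 2 ≤ p) (hd : p ∣ n) :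
    (PySem.Int.floordiv n p).natAbs < n.natAbs := by
  have hm : PySem.Int.mod n p = 0 := (PySem.Int.mod_eq_zero_iff_dvd n p).mpr hd
  have he := PySem.Int.floordiv_mul_add_mod n p
  rw [hm, add_zero] at he
  have habs : (PySem.Int.floordiv n p).natAbs * p.natAbs = n.natAbs := by
    rw [← Int.natAbs_mul, he]
  have hq : (PySem.Int.floordiv n p).natAbs ≠ 0 := by
    intro h0; rw [h0, Nat.zero_mul] at habs; omega
  have hp2 : 2 ≤ p.natAbs := by omega
  have := Nat.mul_le_mul_left (PySem.Int.floordiv n p).natAbs hp2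
  omega

-- ===== PORT A =====
-- while n % p == 0: n //= p   (guards '2 ≤ p ∧ n ≠ 0' only make the recursion total; A calls it with p = 2,3,5 and Pre_ gives n ≠ 0)
def pvStrip (p n : Int) : Int :=
  if h : 2 ≤ p ∧ n ≠ 0 ∧ PySem.Int.mod n p = 0 then
    pvStrip p (PySem.Int.floordiv n p)
  else n
termination_by n.natAbs
decreasing_by
  exact pvDivAbsLt n p h.2.1 h.1 ((PySem.Int.mod_eq_zero_iff_dvd n p).mp h.2.2)

def is_regular (n : Int) : Bool :=
  pvStrip 5 (pvStrip 3 (pvStrip 2 n)) == 1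

-- ===== PORT B =====
-- Python's |mod| shrinks below |divisor|; termination of the hand-written Euclid loop
theorem pvModAbsLt (a b : Int) (hb : b ≠ 0) : (PySem.Int.mod a b).natAbs < b.natAbs := by
  rcases lt_or_gt_of_ne hb with h | h
  · have h1 := PySem.Int.mod_neg_bounds a h
    omega
  · have h1 := PySem.Int.mod_nonneg a h
    have h2 := PySem.Int.mod_lt a h
    omega

-- the inner 'while b: a, b = b, a % b' Euclid loop of Source B
def pvGcd (a b : Int) : Int :=
  if h : b ≠ 0 then pvGcd b (PySem.Int.mod a b) else a
termination_by b.natAbs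
decreasing_by exact pvModAbsLt a b h

-- pvGcd computes Int.gcd on nonnegative arguments (Source B calls it with abs(n) and 30)
theorem pvGcd_eq (b a : Int) (ha : 0 ≤ a) (hb : 0 ≤ b) : pvGcd a b = (Int.gcd a b : Int) := by
  by_cases h : b = 0
  · subst h
    rw [pvGcd]
    simp [Int.gcd, Int.natAbs_of_nonneg ha]
  · have hbpos : 0 < b := lt_of_le_of_ne hb (Ne.symm h)
    rw [pvGcd, dif_pos h, PySem.Int.mod_eq_emod_of_pos hbpos]
    have : pvGcd b (a % b) = (Int.gcd b (a % b) : Int) :=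
      pvGcd_eq (a % b) b hb (Int.emod_nonneg a h)
    rw [this]
    congr 1
    conv_rhs => rw [show a = a % b + b * (a / b) from (Int.emod_add_ediv a b).symm, Int.gcd_comm,
      Int.gcd_add_mul_left_right]
termination_by b.natAbs
decreasing_by
  rw [← PySem.Int.mod_eq_emod_of_pos hbpos]
  exact pvModAbsLt a b h

-- the gcd Source B computes each round, rewritten to Int.gcd (cited by pvLoop's termination proof)
theorem pvGcdAbs (n : Int) : pvGcd (↑n.natAbs) 30 = (Int.gcd n 30 : Int) := by
  rw [pvGcd_eq 30 (↑n.natAbs) (by positivity) (by norm_num)]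
  simp [Int.gcd, Int.natAbs_abs]

-- while True: g = gcd(|n|,30); if g == 1: break; n //= g   (guard 'n ≠ 0' only makes the recursion total)
def pvLoop (n : Int) : Bool :=
  if h : pvGcd (↑n.natAbs) 30 ≠ 1 ∧ n ≠ 0 then
    pvLoop (PySem.Int.floordiv n (pvGcd (↑n.natAbs) 30))
  else n == 1
termination_by n.natAbs
decreasing_by
  rw [pvGcdAbs] at h ⊢
  refine pvDivAbsLt n _ h.2 ?_ (Int.gcd_dvd_left n 30)
  have h30 : Int.gcd n 30 ∣ 30 := by simpa using Int.gcd_dvd_natAbs_right n 30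
  have : Int.gcd n 30 ≠ 0 := by
    intro h0
    exact absurd (Nat.eq_zero_of_zero_dvd (h0 ▸ h30)) (by norm_num)
  have : Int.gcd n 30 ≠ 1 := by intro h1; exact h.1 (by exact_mod_cast h1)
  omega

def is_regular_alt (n : Int) : Bool := pvLoop n

-- ===== PRECONDITION & SPEC =====
-- Pre_ excludes exactly n = 0, where BOTH Pythons loop forever (n % p == 0 and n //= p keep n at 0; gcd(0,30)=30).
def Pre_is_regular (n : Int) : Prop := n ≠ 0
instance (n : Int) : Decidable (Pre_is_regular n) := by unfold Pre_is_regular; infer_instance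
def pvWitness_is_regular : Int := (7)

def Spec_is_regular (n : Int) (out : Bool) : Prop := out = is_regular_alt n
instance (n : Int) (out : Bool) : Decidable (Spec_is_regular n out) := by unfold Spec_is_regular; infer_instance

-- ===== CLAIM (what is proved, stated in full; the proofs are below) =====
def Claim_equal_is_regular : Prop := ∀ (n : Int), Dom_is_regular n → Pre_is_regular n → Spec_is_regular n (is_regular n)

-- ===== LEMMAS AND PROOFS =====

-- n is "regular": positive with no prime factors other than 2, 3, 5
def pvSmooth (n : Int) : Prop :=
  0 < n ∧ ∀ p : ℕ, p.Prime → (p : ℤ) ∣ n → p = 2 ∨ p = 3 ∨ p = 5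

theorem prime_dvd_30 (p : ℕ) (hp : p.Prime) (hd : p ∣ 30) : p = 2 ∨ p = 3 ∨ p = 5 := by
  have h1 := hp.two_le
  have h2 := Nat.le_of_dvd (by norm_num) hd
  interval_cases p <;> revert hp hd <;> decide

-- pvStrip's decomposition: n = p^k * (stripped n), and p no longer divides the result
theorem pvStrip_decomp (p n : Int) (hp : 2 ≤ p) (hn : n ≠ 0) :
    ∃ k : ℕ, n = p ^ k * pvStrip p n ∧ ¬ (p ∣ pvStrip p n) := by
  rw [pvStrip]
  by_cases h : PySem.Int.mod n p = 0
  · have hd : p ∣ n := (PySem.Int.mod_eq_zero_iff_dvd n p).mp h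
    rw [dif_pos ⟨hp, hn, h⟩]
    have he := PySem.Int.floordiv_mul_add_mod n p
    rw [h, add_zero] at he
    have hq : PySem.Int.floordiv n p ≠ 0 := by
      intro h0; rw [h0, zero_mul] at he; exact hn he.symm
    obtain ⟨k, hk1, hk2⟩ := pvStrip_decomp p (PySem.Int.floordiv n p) hp hq
    exact ⟨k + 1, by rw [pow_succ]; nlinarith [hk1, he], hk2⟩
  · rw [dif_neg (by tauto)]
    exact ⟨0, by ring_nf, fun hd => h ((PySem.Int.mod_eq_zero_iff_dvd n p).mpr hd)⟩
termination_by n.natAbs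
decreasing_by
  exact pvDivAbsLt n p hn hp ((PySem.Int.mod_eq_zero_iff_dvd n p).mp h)

-- a positive integer with no prime divisor among 2,3,5 and all prime divisors in {2,3,5} is 1
theorem pvEqOne (m : Int) (hm : m ≠ 0)
    (h2 : ¬ ((2:ℤ) ∣ m)) (h3 : ¬ ((3:ℤ) ∣ m)) (h5 : ¬ ((5:ℤ) ∣ m))
    (hall : ∀ p : ℕ, p.Prime → (p : ℤ) ∣ m → p = 2 ∨ p = 3 ∨ p = 5) : m = 1 ∨ m = -1 := by
  by_contra hne
  push_neg at hne
  have habs : m.natAbs ≠ 1 := by omega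
  obtain ⟨q, hq, hqd⟩ := Nat.exists_prime_and_dvd habs
  have hqz : (q : ℤ) ∣ m := (Int.natAbs_dvd_natAbs).mp (by exact_mod_cast hqd)
  rcases hall q hq hqz with rfl | rfl | rfl
  · exact h2 (by exact_mod_cast hqz)
  · exact h3 (by exact_mod_cast hqz)
  · exact h5 (by exact_mod_cast hqz)

-- A returns true exactly on the smooth inputs (n ≠ 0)
theorem isRegularA_iff (n : Int) (hn : n ≠ 0) : is_regular n = true ↔ pvSmooth n := by
  unfold is_regular
  obtain ⟨a, ha, ha2⟩ := pvStrip_decomp 2 n (by norm_num) hn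
  have hm1 : pvStrip 2 n ≠ 0 := by
    intro h; rw [h, mul_zero] at ha; exact hn ha
  obtain ⟨b, hb, hb3⟩ := pvStrip_decomp 3 (pvStrip 2 n) (by norm_num) hm1
  have hm2 : pvStrip 3 (pvStrip 2 n) ≠ 0 := by
    intro h; rw [h, mul_zero] at hb; exact hm1 hb
  obtain ⟨c, hc, hc5⟩ := pvStrip_decomp 5 (pvStrip 3 (pvStrip 2 n)) (by norm_num) hm2
  have hm3 : pvStrip 5 (pvStrip 3 (pvStrip 2 n)) ≠ 0 := by
    intro h; rw [h, mul_zero] at hc; exact hm2 hc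
  have hneq : n = 2 ^ a * (3 ^ b * (5 ^ c * pvStrip 5 (pvStrip 3 (pvStrip 2 n)))) := by
    rw [← hc, ← hb, ← ha]
  rw [beq_iff_eq]
  constructor
  · intro h1
    rw [h1, mul_one] at hneq
    constructor
    · rw [hneq]; positivity
    · intro p hp hpd
      rw [hneq] at hpd
      have hpz : Prime ((p : ℤ)) := Nat.prime_iff_prime_int.mp hp
      rcases hpz.dvd_mul.mp hpd with h | h
      · left
        have : (p : ℤ) ∣ 2 := hpz.dvd_of_dvd_pow h
        have : p ∣ 2 := by exact_mod_cast this
        exact (Nat.prime_dvd_prime_iff_eq hp (by norm_num)).mp this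
      · rcases hpz.dvd_mul.mp h with h' | h'
        · right; left
          have : (p : ℤ) ∣ 3 := hpz.dvd_of_dvd_pow h'
          have : p ∣ 3 := by exact_mod_cast this
          exact (Nat.prime_dvd_prime_iff_eq hp (by norm_num)).mp this
        · right; right
          have : (p : ℤ) ∣ 5 := hpz.dvd_of_dvd_pow h'
          have : p ∣ 5 := by exact_mod_cast this
          exact (Nat.prime_dvd_prime_iff_eq hp (by norm_num)).mp this
  · rintro ⟨hpos, hdiv⟩
    have hdvd_n : pvStrip 5 (pvStrip 3 (pvStrip 2 n)) ∣ n :=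
      ⟨2 ^ a * (3 ^ b * 5 ^ c), by linear_combination hneq⟩
    have d32 : pvStrip 5 (pvStrip 3 (pvStrip 2 n)) ∣ pvStrip 3 (pvStrip 2 n) :=
      ⟨5 ^ c, by linear_combination hc⟩
    have d21 : pvStrip 3 (pvStrip 2 n) ∣ pvStrip 2 n :=
      ⟨3 ^ b, by linear_combination hb⟩
    have h2' : ¬ ((2:ℤ) ∣ pvStrip 5 (pvStrip 3 (pvStrip 2 n))) := fun h =>
      ha2 ((h.trans d32).trans d21)
    have h3' : ¬ ((3:ℤ) ∣ pvStrip 5 (pvStrip 3 (pvStrip 2 n))) := fun h =>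
      hb3 (h.trans d32)
    have hall : ∀ p : ℕ, p.Prime → (p : ℤ) ∣ pvStrip 5 (pvStrip 3 (pvStrip 2 n)) →
        p = 2 ∨ p = 3 ∨ p = 5 := fun p hp hpd => hdiv p hp (hpd.trans hdvd_n)
    rcases pvEqOne _ hm3 h2' h3' hc5 hall with h1 | h1
    · exact h1
    · exfalso
      rw [h1] at hneq
      have h' : n = -(2 ^ a * (3 ^ b * (5 ^ c : ℤ))) := by rw [hneq]; ring
      have hP : (0:ℤ) < 2 ^ a * (3 ^ b * 5 ^ c) := by positivity
      linarith

-- B returns true exactly on the smooth inputs (n ≠ 0)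
theorem isRegularB_iff (n : Int) (hn : n ≠ 0) : pvLoop n = true ↔ pvSmooth n := by
  rw [pvLoop, pvGcdAbs]
  by_cases hg : ((Int.gcd n 30 : ℤ)) ≠ 1
  · rw [dif_pos ⟨hg, hn⟩]
    have hgd : ((Int.gcd n 30 : ℤ)) ∣ n := Int.gcd_dvd_left n 30
    have hg30 : ((Int.gcd n 30 : ℤ)) ∣ 30 := Int.gcd_dvd_right n 30
    have hgne : Int.gcd n 30 ≠ 0 := by
      intro h0
      have := Int.eq_zero_of_gcd_eq_zero_right h0
      norm_num at this
    have hg2 : (2 : ℤ) ≤ (Int.gcd n 30 : ℤ) := by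
      have : Int.gcd n 30 ≠ 1 := fun h1 => hg (by exact_mod_cast h1)
      omega
    have hq : PySem.Int.floordiv n (Int.gcd n 30 : ℤ) * (Int.gcd n 30 : ℤ) = n := by
      have hm : PySem.Int.mod n (Int.gcd n 30 : ℤ) = 0 :=
        (PySem.Int.mod_eq_zero_iff_dvd n _).mpr hgd
      have he := PySem.Int.floordiv_mul_add_mod n (Int.gcd n 30 : ℤ)
      rw [hm, add_zero] at he
      exact he
    have hqne : PySem.Int.floordiv n (Int.gcd n 30 : ℤ) ≠ 0 := by
      intro h0; rw [h0, zero_mul] at hq; exact hn hq.symm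
    rw [isRegularB_iff (PySem.Int.floordiv n (Int.gcd n 30 : ℤ)) hqne]
    constructor
    · rintro ⟨hqpos, hqdiv⟩
      constructor
      · nlinarith [hq, hqpos, hg2]
      · intro p hp hpd
        have hpz : Prime ((p : ℤ)) := Nat.prime_iff_prime_int.mp hp
        rw [← hq] at hpd
        rcases hpz.dvd_mul.mp hpd with h | h
        · exact hqdiv p hp h
        · have : (p : ℤ) ∣ 30 := h.trans hg30
          have : p ∣ 30 := by exact_mod_cast this
          exact prime_dvd_30 p hp this
    · rintro ⟨hnpos, hndiv⟩
      constructor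
      · by_contra hle
        push_neg at hle
        nlinarith [hq, hle, hg2, hnpos]
      · intro p hp hpd
        exact hndiv p hp (hpd.trans ⟨(Int.gcd n 30 : ℤ), hq.symm⟩)
  · rw [dif_neg (by tauto)]
    push_neg at hg
    have hg1 : Int.gcd n 30 = 1 := by exact_mod_cast hg
    rw [beq_iff_eq]
    constructor
    · rintro rfl
      refine ⟨one_pos, fun p hp hpd => ?_⟩
      have hp1 : p ∣ 1 := by exact_mod_cast hpd
      exact absurd (Nat.eq_one_of_dvd_one hp1) hp.one_lt.ne'
    · rintro ⟨hpos, hdiv⟩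
      by_contra hne1
      have habs : n.natAbs ≠ 1 := by omega
      obtain ⟨q, hqp, hqd⟩ := Nat.exists_prime_and_dvd habs
      have hqz : (q : ℤ) ∣ n := (Int.natAbs_dvd_natAbs).mp (by exact_mod_cast hqd)
      have hq30 : q ∣ 30 := by
        rcases hdiv q hqp hqz with rfl | rfl | rfl <;> norm_num
      have : q ∣ Int.gcd n 30 := Nat.dvd_gcd hqd (by simpa using hq30)
      rw [hg1] at this
      exact hqp.one_lt.ne' (Nat.eq_one_of_dvd_one this)
termination_by n.natAbs
decreasing_by
  exact pvDivAbsLt n _ hn (by exact_mod_cast hg2) hgd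

-- ===== VERDICT (by name: the statement is the Claim_ definition above) =====
theorem is_regular_spec : Claim_equal_is_regular := by
  intro n _ hpre
  unfold Spec_is_regular is_regular_alt
  rw [Bool.eq_iff_iff, isRegularA_iff n hpre, isRegularB_iff n hpre]
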